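-- pv_equiv track=rewrite | github.com/Ro4Git/adventofcode | 2023/day11.py | findExpandSpot
-- ===== SOURCE A (Python) =====
-- def findExpandSpot(grid):
--     toExpandY = []
--     for i,line in enumerate(grid):
--         if not 1 in line:
--             toExpandY.append(i)
--     #expand horizontally
--     toExpandX = []
--     for i in range(len(grid[0])):
--         row = [line[i] for line in grid]
--         if not 1 in row:
--             toExpandX.append(i)
--     return (toExpandX,toExpandY)
-- ===== SOURCE B (Python) =====
-- def findExpandSpot(grid):
--     cols = len(grid[0])
--     hasOne = [False] * cols
--     toExpandY = []
--     for i, line in enumerate(grid):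
--         if 1 not in line:
--             toExpandY.append(i)
--         for j in range(cols):
--             if line[j] == 1:
--                 hasOne[j] = True
--     toExpandX = [j for j in range(cols) if not hasOne[j]]
--     return (toExpandX, toExpandY)
-- ===== Notes on version B (the rewrite author's own statement) =====
-- stated objective: alternative
-- what changed: One row-major pass maintaining a per-column hasOne flag array replaces A's column pass that rebuilds every column as a fresh list and rescans it; empty columns are read off the flags afterwards.
import Mathlib
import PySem

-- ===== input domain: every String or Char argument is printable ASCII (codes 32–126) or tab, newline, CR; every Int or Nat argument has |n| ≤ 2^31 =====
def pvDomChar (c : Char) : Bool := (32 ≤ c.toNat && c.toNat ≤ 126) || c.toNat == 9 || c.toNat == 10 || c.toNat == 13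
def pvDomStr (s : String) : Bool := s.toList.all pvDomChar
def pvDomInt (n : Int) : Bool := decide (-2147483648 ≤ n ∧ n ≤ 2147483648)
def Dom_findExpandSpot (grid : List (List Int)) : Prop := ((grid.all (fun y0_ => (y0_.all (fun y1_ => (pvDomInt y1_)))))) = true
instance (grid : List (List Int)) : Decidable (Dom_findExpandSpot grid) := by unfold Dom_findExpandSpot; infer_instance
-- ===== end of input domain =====

-- B replaces A's column-rebuilding second pass by per-column hasOne flags maintained in one row-major pass (a different data structure, same asymptotic cost).

-- ===== PORT A =====
def findExpandSpot (grid : List (List Int)) : List Int × List Int :=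
  let toExpandY := (PySem.List.enumerate grid 0).foldl
    (fun acc p => if ! p.2.contains 1 then acc ++ [p.1] else acc) []
  let toExpandX := (PySem.List.pyRange 0 (((PySem.List.pyGet? grid 0).getD []).length : Int) 1).foldl
    (fun acc i =>
      let row := grid.map (fun line => PySem.List.pyGetD line i 0)
      if ! row.contains 1 then acc ++ [i] else acc) []
  (toExpandX, toExpandY)

-- ===== PORT B =====
def findExpandSpot_alt (grid : List (List Int)) : List Int × List Int :=
  let cols := ((PySem.List.pyGet? grid 0).getD []).length
  let st := (PySem.List.enumerate grid 0).foldl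
    (fun st p =>
      (if ! p.2.contains 1 then st.1 ++ [p.1] else st.1,
       (List.range cols).foldl
         (fun ho j => if PySem.List.pyGetD p.2 (j : Int) 0 = 1 then ho.set j true else ho : List Bool → Nat → List Bool) st.2))
    ([], List.replicate cols false)
  (((List.range cols).filter (fun j => ! st.2.getD j false)).map (fun j => Int.ofNat j), st.1)

-- ===== PRECONDITION & SPEC =====
-- Pre_ excludes exactly the inputs where Python A raises IndexError: the empty grid (grid[0])
-- and ragged grids where some line is shorter than the first (line[i] in the column pass).
def Pre_findExpandSpot (grid : List (List Int)) : Prop :=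
  grid ≠ [] ∧ ∀ line ∈ grid, (grid.headD []).length ≤ line.length
instance (grid : List (List Int)) : Decidable (Pre_findExpandSpot grid) := by unfold Pre_findExpandSpot; infer_instance
def pvWitness_findExpandSpot : List (List Int) := [[1, 0], [0, 0]]
def Spec_findExpandSpot (grid : List (List Int)) (out : List Int × List Int) : Prop := out = findExpandSpot_alt grid
instance (grid : List (List Int)) (out : List Int × List Int) : Decidable (Spec_findExpandSpot grid out) := by unfold Spec_findExpandSpot; infer_instance

-- ===== CLAIM (what is proved, stated in full; the proofs are below) =====
def Claim_equal_findExpandSpot : Prop := ∀ (grid : List (List Int)), Dom_findExpandSpot grid → Pre_findExpandSpot grid → Spec_findExpandSpot grid (findExpandSpot grid)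

-- ===== LEMMAS AND PROOFS =====

-- getD after set, with the usual bounds case split
theorem getD_set_bool (l : List Bool) (i k : Nat) (d b : Bool) :
    (l.set i b).getD k d = if k = i ∧ i < l.length then b else l.getD k d := by
  simp [List.getD_eq_getElem?_getD, List.getElem?_set]
  split_ifs <;> simp_all

-- the inner flag-setting loop of B preserves the length of hasOne
theorem inner_length (line : List Int) (l : List Nat) (ho : List Bool) :
    (l.foldl (fun (ho : List Bool) (j : Nat) =>
        if PySem.List.pyGetD line (j : Int) 0 = 1 then ho.set j true else ho) ho).length
      = ho.length := by
  induction l generalizing ho with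
  | nil => rfl
  | cons x xs ih => simp only [List.foldl_cons]; rw [ih]; split <;> simp

-- pointwise value of hasOne after the inner loop over range cols
theorem inner_getD (line : List Int) (cols : Nat) (ho : List Bool) (hlen : cols ≤ ho.length) (k : Nat) :
    ((List.range cols).foldl (fun (ho : List Bool) (j : Nat) =>
        if PySem.List.pyGetD line (j : Int) 0 = 1 then ho.set j true else ho) ho).getD k false
      = (ho.getD k false || (decide (k < cols) && decide (PySem.List.pyGetD line (k : Int) 0 = 1))) := by
  induction cols with
  | zero => simp
  | succ n ih =>
    rw [List.range_succ, List.foldl_append]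
    simp only [List.foldl_cons, List.foldl_nil]
    have hlen' : n ≤ ho.length := by omega
    have hres := inner_length line (List.range n) ho
    split_ifs with hc
    · rw [getD_set_bool, ih hlen']
      by_cases hk : k = n
      · subst hk
        rw [if_pos ⟨rfl, by rw [hres]; omega⟩, decide_eq_true hc]
        simp
      · simp only [hres]
        have : ¬ (k = n ∧ n < ho.length) := by tauto
        simp only [if_neg this]
        congr 1
        by_cases hkn : k < n
        · simp [hkn, Nat.lt_succ_of_lt hkn]
        · have : ¬ k < n + 1 := by omega
          simp [hkn, this]
    · rw [ih hlen']
      congr 1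
      by_cases hk : k = n
      · subst hk
        rw [decide_eq_false hc]
        simp
      · by_cases hkn : k < n
        · simp [hkn, Nat.lt_succ_of_lt hkn]
        · have : ¬ k < n + 1 := by omega
          simp [hkn, this]

-- pointwise value of hasOne after folding the inner loop over the whole grid
theorem outer_getD (cols : Nat) (g : List (List Int)) (ho : List Bool)
    (hlen : ho.length = cols) (k : Nat) (hk : k < cols) :
    (g.foldl (fun (ho : List Bool) (line : List Int) =>
        (List.range cols).foldl (fun (ho : List Bool) (j : Nat) =>
          if PySem.List.pyGetD line (j : Int) 0 = 1 then ho.set j true else ho) ho) ho).getD k false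
      = (ho.getD k false || g.any (fun line => decide (PySem.List.pyGetD line (k : Int) 0 = 1))) := by
  induction g generalizing ho with
  | nil => simp
  | cons line rest ih =>
    simp only [List.foldl_cons, List.any_cons]
    rw [ih _ (by rw [inner_length]; exact hlen), inner_getD line cols ho (le_of_eq hlen.symm) k]
    simp [hk, Bool.or_assoc]

-- ===== VERDICT (by name: the statement is the Claim_ definition above) =====
theorem findExpandSpot_spec : Claim_equal_findExpandSpot := by
  intro grid _hdom _hpre
  unfold Spec_findExpandSpot findExpandSpot findExpandSpot_alt
  dsimp only
  rw [PySem.List.foldl_prod_mk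
        (f := fun acc (p : Int × List Int) => if ! p.2.contains 1 then acc ++ [p.1] else acc)
        (g := fun ho (p : Int × List Int) => (List.range ((PySem.List.pyGet? grid 0).getD []).length).foldl
            (fun (ho : List Bool) (j : Nat) =>
              if PySem.List.pyGetD p.2 (j : Int) 0 = 1 then ho.set j true else ho) ho)]
  refine Prod.ext ?_ rfl
  dsimp only
  rw [PySem.List.foldl_append_if_eq_filter
        (p := fun i => ! (grid.map (fun line => PySem.List.pyGetD line i 0)).contains 1),
      List.nil_append, PySem.List.pyRange_zero_nat, List.filter_map]
  generalize ((PySem.List.pyGet? grid 0).getD []).length = cols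
  have hho : (PySem.List.enumerate grid 0).foldl
      (fun ho (p : Int × List Int) => (List.range cols).foldl
        (fun (ho : List Bool) (j : Nat) =>
          if PySem.List.pyGetD p.2 (j : Int) 0 = 1 then ho.set j true else ho) ho)
      (List.replicate cols false)
      = grid.foldl
      (fun ho (line : List Int) => (List.range cols).foldl
        (fun (ho : List Bool) (j : Nat) =>
          if PySem.List.pyGetD line (j : Int) 0 = 1 then ho.set j true else ho) ho)
      (List.replicate cols false) := by
    conv_rhs => rw [← PySem.List.map_snd_enumerate grid 0]
    rw [List.foldl_map]
  rw [hho]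
  have hfilt : List.filter
      ((fun i => !(List.map (fun line => PySem.List.pyGetD line i 0) grid).contains 1) ∘ (fun k : Nat => (k : Int)))
      (List.range cols)
      = List.filter (fun j : Nat => !(grid.foldl
          (fun ho (line : List Int) => (List.range cols).foldl
            (fun (ho : List Bool) (j : Nat) =>
              if PySem.List.pyGetD line (j : Int) 0 = 1 then ho.set j true else ho) ho)
          (List.replicate cols false)).getD j false) (List.range cols) := by
    apply List.filter_congr
    intro j hj
    have hj' : j < cols := List.mem_range.mp hj
    rw [outer_getD _ _ _ (List.length_replicate) j hj',
        List.getD_replicate false hj', Bool.false_or]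
    simp only [Function.comp]
    congr 1
    rw [Bool.eq_iff_iff]; simp
  rw [hfilt]
  rfl
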